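-- pv_equiv track=rewrite | github.com/jaaguptamme/Distributed-Systems-Seminar | SinfoniaFinal.py | _dedup_last_wins
-- ===== SOURCE A (Python) =====
-- def _dedup_last_wins(items):
--     seen = set()
--     prepared = []
--     for key, value in reversed(items):
--         if key in seen:
--             continue
--         seen.add(key)
--         prepared.append((key, value))
--     prepared.reverse()
--     return prepared
-- ===== SOURCE B (Python) =====
-- def _dedup_last_wins(items):
--     d = {}
--     for key, value in items:
--         if key in d:
--             del d[key]
--         d[key] = value
--     return list(d.items())
-- ===== Notes on version B (the rewrite author's own statement) =====
-- stated objective: idiomatic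
-- what changed: Replaces the reversed-iteration-with-seen-set-plus-final-reverse by a single forward pass over items that keeps an insertion-ordered dict, deleting an existing key before reinserting it so each key ends up at its last-occurrence position.
import Mathlib
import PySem

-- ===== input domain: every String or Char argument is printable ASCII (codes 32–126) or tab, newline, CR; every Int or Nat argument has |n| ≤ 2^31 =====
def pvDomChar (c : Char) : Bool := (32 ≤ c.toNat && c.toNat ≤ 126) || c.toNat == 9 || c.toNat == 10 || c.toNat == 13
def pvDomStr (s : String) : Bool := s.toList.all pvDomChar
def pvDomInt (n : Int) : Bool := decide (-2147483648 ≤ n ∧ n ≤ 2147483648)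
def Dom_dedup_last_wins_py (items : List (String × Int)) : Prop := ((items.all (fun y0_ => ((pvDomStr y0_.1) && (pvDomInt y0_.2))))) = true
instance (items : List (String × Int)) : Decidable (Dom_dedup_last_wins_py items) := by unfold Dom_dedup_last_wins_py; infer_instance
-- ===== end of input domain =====

-- B replaces A's reversed scan + seen-set + final reverse by one forward pass over an
-- insertion-ordered dict with delete-then-reinsert; same cost, more idiomatic.

-- ===== PORT A =====
-- for key, value in reversed(items): skip seen keys, else append; then prepared.reverse()
def dedup_last_wins_py (items : List (String × Int)) : List (String × Int) :=
  (items.reverse.foldl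
    (fun (st : PySem.Set String × List (String × Int)) p =>
      if PySem.Set.contains st.1 p.1 then st
      else (PySem.Set.add st.1 p.1, st.2 ++ [p]))
    (PySem.Set.empty, [])).2.reverse

-- ===== PORT B =====
-- forward pass: if key in d: del d[key]; d[key] = value; return list(d.items())
def dedup_last_wins_py_alt (items : List (String × Int)) : List (String × Int) :=
  (items.foldl
    (fun (d : PySem.Dict String Int) p =>
      (if d.contains p.1 then d.erase p.1 else d).insert p.1 p.2)
    PySem.Dict.empty).items

-- ===== PRECONDITION & SPEC =====
def Spec_dedup_last_wins_py (items : List (String × Int)) (out : List (String × Int)) : Prop := out = dedup_last_wins_py_alt items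
instance (items : List (String × Int)) (out : List (String × Int)) : Decidable (Spec_dedup_last_wins_py items out) := by unfold Spec_dedup_last_wins_py; infer_instance

-- ===== CLAIM (what is proved, stated in full; the proofs are below) =====
def Claim_equal_dedup_last_wins_py : Prop := ∀ (items : List (String × Int)), Dom_dedup_last_wins_py items → Spec_dedup_last_wins_py items (dedup_last_wins_py items)

-- ===== LEMMAS AND PROOFS =====

-- accumulator-free characterisation of A's reversed scan
def pvKeep (L : List (String × Int)) (s : PySem.Set String) : List (String × Int) :=
  match L with
  | [] => []
  | p :: L => if PySem.Set.contains s p.1 then pvKeep L s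
              else p :: pvKeep L (PySem.Set.add s p.1)

theorem pv_contains_add (s : PySem.Set String) (x y : String) :
    (PySem.Set.add s x).contains y = (s.contains y || y == x) := by
  simp only [PySem.Set.add, PySem.Set.contains]
  by_cases hxy : y = x
  · subst hxy; split_ifs with h <;> simp_all
  · split_ifs with h <;> simp [List.mem_append, hxy]

theorem pv_foldlA (L : List (String × Int)) (s : PySem.Set String)
    (acc : List (String × Int)) :
    (L.foldl
      (fun (st : PySem.Set String × List (String × Int)) p =>
        if PySem.Set.contains st.1 p.1 then st
        else (PySem.Set.add st.1 p.1, st.2 ++ [p])) (s, acc)).2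
      = acc ++ pvKeep L s := by
  induction L generalizing s acc with
  | nil => simp [pvKeep]
  | cons p L ih =>
    simp only [List.foldl_cons, pvKeep]
    by_cases h : PySem.Set.contains s p.1 = true
    · rw [if_pos h, if_pos h, ih]
    · rw [if_neg h, if_neg h, ih, List.append_assoc, List.singleton_append]

theorem pv_keep_filter (L : List (String × Int)) (s1 s2 : PySem.Set String)
    (k : String) (h : ∀ x, s1.contains x = (s2.contains x || x == k)) :
    pvKeep L s1 = (pvKeep L s2).filter (fun q => !(q.1 == k)) := by
  induction L generalizing s1 s2 with
  | nil => simp [pvKeep]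
  | cons p L ih =>
    simp only [pvKeep]
    by_cases h2 : PySem.Set.contains s2 p.1 = true
    · have h1 : PySem.Set.contains s1 p.1 = true := by rw [h, h2]; rfl
      rw [if_pos h1, if_pos h2]
      exact ih s1 s2 h
    · by_cases hk : p.1 = k
      · have h1 : PySem.Set.contains s1 p.1 = true := by rw [h]; simp [hk]
        rw [if_pos h1, if_neg h2, List.filter_cons, if_neg (by simp [hk])]
        refine ih s1 (PySem.Set.add s2 p.1) ?_
        intro x
        rw [h, pv_contains_add, hk]
        cases hc : s2.contains x <;> cases he : x == k <;> simp
      · have h2' : s2.contains p.1 = false := by simpa using h2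
        have h1 : ¬ PySem.Set.contains s1 p.1 = true := by rw [h, h2']; simp [hk]
        rw [if_neg h1, if_neg h2, List.filter_cons, if_pos (by simp [hk])]
        refine congrArg (p :: ·) (ih _ _ ?_)
        intro x
        rw [pv_contains_add, pv_contains_add, h]
        cases hc : s2.contains x <;> cases hp : x == p.1 <;> cases he : x == k <;>
          simp

theorem pv_contains_iff (d : PySem.Dict String Int) (k : String) :
    d.contains k = true ↔ k ∈ d.items.map Prod.fst := by
  rw [PySem.Dict.contains_iff_mem_keys]
  rfl

theorem pv_step_items (d : PySem.Dict String Int) (p : String × Int) :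
    ((if d.contains p.1 then d.erase p.1 else d).insert p.1 p.2).items
      = d.items.filter (fun q => !(q.1 == p.1)) ++ [p] := by
  by_cases h : d.contains p.1 = true
  · rw [if_pos h]
    have herase : (d.erase p.1).items = d.items.filter (fun q => !(q.1 == p.1)) := by
      simp [PySem.Dict.erase]
    have hnc : (d.erase p.1).contains p.1 = false := by
      rw [Bool.eq_false_iff]
      intro hc
      rw [pv_contains_iff, herase] at hc
      simp only [List.mem_map, List.mem_filter] at hc
      obtain ⟨q, ⟨_, hq⟩, hq1⟩ := hc
      simp [hq1] at hq
    rw [PySem.Dict.items_insert_of_not_contains _ _ hnc, herase]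
  · rw [if_neg h]
    rw [PySem.Dict.items_insert_of_not_contains _ _ (by simpa using h)]
    have hfil : d.items.filter (fun q => !(q.1 == p.1)) = d.items := by
      apply List.filter_eq_self.2
      intro q hq
      have hne : q.1 ≠ p.1 := fun hq1 =>
        absurd ((pv_contains_iff d p.1).2 (List.mem_map.2 ⟨q, hq, hq1⟩)) (by simpa using h)
      simp [hne]
    rw [hfil]

theorem pv_A_keep (L : List (String × Int)) :
    dedup_last_wins_py L = (pvKeep L.reverse PySem.Set.empty).reverse := by
  unfold dedup_last_wins_py
  rw [pv_foldlA, List.nil_append]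

theorem pv_main (items : List (String × Int)) :
    dedup_last_wins_py items = dedup_last_wins_py_alt items := by
  induction items using List.reverseRecOn with
  | nil => rfl
  | append_singleton L p ih =>
    rw [pv_A_keep]
    simp only [List.reverse_append, List.reverse_cons, List.reverse_nil, List.nil_append,
      List.singleton_append]
    have hc : ¬ PySem.Set.contains PySem.Set.empty p.1 = true := by
      simp [PySem.Set.contains, PySem.Set.empty]
    rw [pvKeep, if_neg hc]
    rw [pv_keep_filter L.reverse (PySem.Set.add PySem.Set.empty p.1) PySem.Set.empty p.1
        (fun x => pv_contains_add _ _ _)]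
    rw [List.reverse_cons, ← List.filter_reverse, ← pv_A_keep, ih]
    unfold dedup_last_wins_py_alt
    rw [List.foldl_append, List.foldl_cons, List.foldl_nil, pv_step_items]

-- ===== VERDICT (by name: the statement is the Claim_ definition above) =====
theorem dedup_last_wins_py_spec : Claim_equal_dedup_last_wins_py := by
  intro items _
  unfold Spec_dedup_last_wins_py
  exact pv_main items
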